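-- pv_equiv track=rewrite | github.com/I00jey/Algorithm | programmers/기초/조건에 맞게 수열 변환하기 2.py | solution
-- ===== SOURCE A (Python) =====
-- def solution(arr):
--     count = 0
--     nochange = 0
--     while True:
--         for idx, val in enumerate(arr):
--             if val >= 50 and val % 2 == 0:
--                 arr[idx] = val // 2
--             elif val < 50 and val % 2 == 1:
--                 arr[idx] = val * 2 + 1
--             else:
--                 nochange += 1
--         if nochange == len(arr):
--             break
--         count += 1
--         nochange = 0
--     return count
-- ===== SOURCE B (Python) =====
-- def solution(arr):
--     def steps(v):
--         s = 0
--         while True: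
--             if v >= 50 and v % 2 == 0:
--                 v //= 2
--             elif v < 50 and v % 2 == 1:
--                 v = v * 2 + 1
--             else:
--                 return s
--             s += 1
--     return max((steps(v) for v in arr), default=0)
-- ===== Notes on version B (the rewrite author's own statement) =====
-- stated objective: faster
-- what changed: Instead of repeatedly sweeping the whole array until a pass changes nothing, B simulates each element independently to its fixed point and returns the maximum per-element step count.
import Mathlib
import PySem

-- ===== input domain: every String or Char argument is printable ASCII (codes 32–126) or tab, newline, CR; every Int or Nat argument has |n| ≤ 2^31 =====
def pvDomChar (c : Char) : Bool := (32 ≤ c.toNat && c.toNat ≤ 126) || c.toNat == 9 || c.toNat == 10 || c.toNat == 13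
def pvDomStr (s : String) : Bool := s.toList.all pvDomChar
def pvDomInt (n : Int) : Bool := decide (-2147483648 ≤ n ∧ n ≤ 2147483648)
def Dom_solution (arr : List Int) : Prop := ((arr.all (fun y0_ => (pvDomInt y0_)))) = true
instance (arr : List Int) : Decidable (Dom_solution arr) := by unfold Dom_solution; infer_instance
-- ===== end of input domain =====

-- B replaces A's repeated whole-array passes by an independent per-element simulation to the
-- fixed point, returning the maximum per-element step count (objective: faster).
-- NOTE: the Python A mutates its argument list in place; the equivalence proved here is about
-- the RETURN value only (B does not mutate).
-- A's 'while True' loop is ported with a fuel parameter (100): inside Pre_ and Dom_ every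
-- element stabilises well within 100 steps (proved below), so the fuel is never exhausted on
-- admitted inputs.  B's 'while True' in steps() is ported with the same fuel.

-- ===== PORT A =====
-- one 'for idx, val in enumerate(arr)' pass: rebuilds the array and counts unchanged slots
def pvPassA : List Int → List Int → Nat → (List Int × Nat)
  | [], acc, nc => (acc.reverse, nc)
  | val :: rest, acc, nc =>
    if val ≥ 50 ∧ PySem.Int.mod val 2 = 0 then
      pvPassA rest (PySem.Int.floordiv val 2 :: acc) nc
    else if val < 50 ∧ PySem.Int.mod val 2 = 1 then
      pvPassA rest ((val * 2 + 1) :: acc) nc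
    else
      pvPassA rest (val :: acc) (nc + 1)

-- the 'while True' loop of A (fuel-bounded; fuel suffices on Pre_/Dom_ inputs)
def pvLoopA : Nat → List Int → Int → Int
  | 0, _, count => count
  | fuel + 1, arr, count =>
    let p := pvPassA arr [] 0
    if p.2 = arr.length then count
    else pvLoopA fuel p.1 (count + 1)

def solution (arr : List Int) : Int := pvLoopA 100 arr 0

-- ===== PORT B =====
-- steps(v): iterate the per-element rule until the else-branch returns, counting steps
def pvStepsB : Nat → Int → Int → Int
  | 0, _, s => s
  | fuel + 1, v, s =>
    if v ≥ 50 ∧ PySem.Int.mod v 2 = 0 then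
      pvStepsB fuel (PySem.Int.floordiv v 2) (s + 1)
    else if v < 50 ∧ PySem.Int.mod v 2 = 1 then
      pvStepsB fuel (v * 2 + 1) (s + 1)
    else s

def solution_alt (arr : List Int) : Int :=
  (arr.map (fun v => pvStepsB 100 v 0)).foldl max 0

-- ===== PRECONDITION & SPEC =====
-- Pre_ excludes exactly the inputs on which the Python A never returns: a negative odd element
-- makes the 'val * 2 + 1' branch fire forever (Python's -3 % 2 == 1), so A's loop diverges.
def Pre_solution (arr : List Int) : Prop :=
  ∀ v ∈ arr, ¬ (v < 0 ∧ PySem.Int.mod v 2 = 1)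
instance (arr : List Int) : Decidable (Pre_solution arr) := by unfold Pre_solution; infer_instance

def pvWitness_solution : List Int := [1, 100, 51, -4]

def Spec_solution (arr : List Int) (out : Int) : Prop := out = solution_alt arr
instance (arr : List Int) (out : Int) : Decidable (Spec_solution arr out) := by unfold Spec_solution; infer_instance

-- ===== CLAIM (what is proved, stated in full; the proofs are below) =====
def Claim_equal_solution : Prop := ∀ (arr : List Int), Dom_solution arr → Pre_solution arr → Spec_solution arr (solution arr)

-- ===== LEMMAS AND PROOFS =====

-- equation lemmas for the ports
lemma pvPassA_cons (v : Int) (rest acc : List Int) (nc : Nat) : pvPassA (v :: rest) acc nc =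
    if v ≥ 50 ∧ PySem.Int.mod v 2 = 0 then pvPassA rest (PySem.Int.floordiv v 2 :: acc) nc
    else if v < 50 ∧ PySem.Int.mod v 2 = 1 then pvPassA rest ((v * 2 + 1) :: acc) nc
    else pvPassA rest (v :: acc) (nc + 1) := rfl

lemma pvLoopA_succ (F : Nat) (arr : List Int) (count : Int) : pvLoopA (F + 1) arr count =
    if (pvPassA arr [] 0).2 = arr.length then count
    else pvLoopA F (pvPassA arr [] 0).1 (count + 1) := rfl

lemma pvStepsB_succ (F : Nat) (v s : Int) : pvStepsB (F + 1) v s =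
    if v ≥ 50 ∧ PySem.Int.mod v 2 = 0 then pvStepsB F (PySem.Int.floordiv v 2) (s + 1)
    else if v < 50 ∧ PySem.Int.mod v 2 = 1 then pvStepsB F (v * 2 + 1) (s + 1)
    else s := rfl

-- the element-wise transformation and the "this element changes" test
def pvChg (v : Int) : Bool :=
  decide (v ≥ 50 ∧ PySem.Int.mod v 2 = 0) || decide (v < 50 ∧ PySem.Int.mod v 2 = 1)

def pvStep (v : Int) : Int :=
  if v ≥ 50 ∧ PySem.Int.mod v 2 = 0 then PySem.Int.floordiv v 2
  else if v < 50 ∧ PySem.Int.mod v 2 = 1 then v * 2 + 1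
  else v

lemma pvChg_iff (v : Int) : pvChg v = true ↔
    (v ≥ 50 ∧ PySem.Int.mod v 2 = 0) ∨ (v < 50 ∧ PySem.Int.mod v 2 = 1) := by
  unfold pvChg; simp

lemma pvChg_false_iff (v : Int) : pvChg v = false ↔
    ¬ (v ≥ 50 ∧ PySem.Int.mod v 2 = 0) ∧ ¬ (v < 50 ∧ PySem.Int.mod v 2 = 1) := by
  unfold pvChg; simp

lemma pvStep_of_not_chg {v : Int} (h : pvChg v = false) : pvStep v = v := by
  rw [pvChg_false_iff] at h
  unfold pvStep
  rw [if_neg h.1, if_neg h.2]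

-- "settles within F steps" (the change-test fails at the F-th iterate)
def pvSettles (F : Nat) (v : Int) : Prop := pvChg (pvStep^[F] v) = false

lemma pvSettles_succ_iff (F : Nat) (v : Int) : pvSettles (F + 1) v ↔ pvSettles F (pvStep v) := by
  unfold pvSettles
  rw [Function.iterate_succ_apply]

lemma pvSettles_of_not_chg {v : Int} (h : pvChg v = false) : ∀ F, pvSettles F v := by
  intro F
  unfold pvSettles
  rw [Function.iterate_fixed (pvStep_of_not_chg h) F]
  exact h

lemma pvSettles_mono {F : Nat} {v : Int} (h : pvSettles F v) : pvSettles (F + 1) v := by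
  unfold pvSettles at *
  rw [Function.iterate_succ_apply', pvStep_of_not_chg h]
  exact h

lemma pvSettles_le {F G : Nat} {v : Int} (hFG : F ≤ G) (h : pvSettles F v) : pvSettles G v := by
  induction G with
  | zero => rwa [Nat.le_zero.1 hFG] at h
  | succ G ih =>
    rcases Nat.lt_or_ge F (G + 1) with hlt | hge
    · exact pvSettles_mono (ih (by omega))
    · rwa [show F = G + 1 by omega] at h

-- ---- characterising A's pass ----
lemma pvPassA_spec (xs : List Int) : ∀ acc nc,
    pvPassA xs acc nc = (acc.reverse ++ xs.map pvStep, nc + xs.countP (fun v => !pvChg v)) := by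
  induction xs with
  | nil => intro acc nc; simp [pvPassA]
  | cons v rest ih =>
    intro acc nc
    rw [pvPassA_cons]
    by_cases h1 : v ≥ 50 ∧ PySem.Int.mod v 2 = 0
    · have hc : pvChg v = true := (pvChg_iff v).2 (Or.inl h1)
      have hs : pvStep v = PySem.Int.floordiv v 2 := by unfold pvStep; rw [if_pos h1]
      rw [if_pos h1, ih]
      simp [hs, hc, List.countP_cons]
    · rw [if_neg h1]
      by_cases h2 : v < 50 ∧ PySem.Int.mod v 2 = 1
      · have hc : pvChg v = true := (pvChg_iff v).2 (Or.inr h2)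
        have hs : pvStep v = v * 2 + 1 := by unfold pvStep; rw [if_neg h1, if_pos h2]
        rw [if_pos h2, ih]
        simp [hs, hc, List.countP_cons]
      · have hc : pvChg v = false := (pvChg_false_iff v).2 ⟨h1, h2⟩
        have hs : pvStep v = v := pvStep_of_not_chg hc
        rw [if_neg h2, ih]
        simp [hs, hc, List.countP_cons]
        omega

lemma pvPass_count_eq_length_iff (arr : List Int) :
    arr.countP (fun v => !pvChg v) = arr.length ↔ ∀ v ∈ arr, pvChg v = false := by
  rw [List.countP_eq_length]
  constructor
  · intro h v hv; simpa using h v hv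
  · intro h v hv; simpa using h v hv

-- ---- characterising B's per-element loop ----
lemma pvStepsB_of_not_chg {v : Int} (h : pvChg v = false) : ∀ F s, pvStepsB F v s = s := by
  intro F s
  rw [pvChg_false_iff] at h
  cases F with
  | zero => rfl
  | succ F => rw [pvStepsB_succ, if_neg h.1, if_neg h.2]

lemma pvStepsB_of_chg {v : Int} (h : pvChg v = true) (F : Nat) (s : Int) :
    pvStepsB (F + 1) v s = pvStepsB F (pvStep v) (s + 1) := by
  rw [pvStepsB_succ]
  unfold pvStep
  by_cases h1 : v ≥ 50 ∧ PySem.Int.mod v 2 = 0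
  · rw [if_pos h1, if_pos h1]
  · by_cases h2 : v < 50 ∧ PySem.Int.mod v 2 = 1
    · rw [if_neg h1, if_pos h2, if_neg h1, if_pos h2]
    · rw [pvChg_iff] at h
      exact absurd h (by tauto)

lemma pvStepsB_shift : ∀ F (v : Int) (s : Int), pvStepsB F v s = s + pvStepsB F v 0 := by
  intro F
  induction F with
  | zero => intro v s; simp [pvStepsB]
  | succ F ih =>
    intro v s
    by_cases h : pvChg v = true
    · rw [pvStepsB_of_chg h, pvStepsB_of_chg h, ih (pvStep v) (s + 1), ih (pvStep v) (0 + 1)]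
      ring
    · rw [pvStepsB_of_not_chg (by simpa using h), pvStepsB_of_not_chg (by simpa using h)]
      ring

lemma pvStepsB_nonneg : ∀ F (v : Int) (s : Int), 0 ≤ s → 0 ≤ pvStepsB F v s := by
  intro F
  induction F with
  | zero => intro v s hs; simpa [pvStepsB] using hs
  | succ F ih =>
    intro v s hs
    by_cases h : pvChg v = true
    · rw [pvStepsB_of_chg h]; exact ih _ _ (by omega)
    · rw [pvStepsB_of_not_chg (by simpa using h)]; exact hs

-- ---- foldl max helpers ----
lemma foldl_max_le {c : Int} : ∀ (l : List Int) (a : Int), a ≤ c → (∀ x ∈ l, x ≤ c) →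
    l.foldl max a ≤ c := by
  intro l
  induction l with
  | nil => intro a ha _; simpa using ha
  | cons x xs ih =>
    intro a ha hl
    simp only [List.foldl_cons]
    exact ih _ (max_le ha (hl x (by simp))) (fun y hy => hl y (by simp [hy]))

lemma foldl_max_eq_zero {l : List Int} (h : ∀ x ∈ l, x = 0) : l.foldl max 0 = 0 := by
  refine le_antisymm (foldl_max_le l 0 le_rfl (fun x hx => le_of_eq (h x hx)))
    (PySem.List.le_foldl_max l 0).1

-- ---- the main invariant: A's loop value = max of B's per-element counts ----
lemma pvLoop_eq_max : ∀ (F : Nat) (arr : List Int) (count : Int),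
    (∀ v ∈ arr, pvSettles F v) →
    pvLoopA F arr count = count + (arr.map (fun v => pvStepsB F v 0)).foldl max 0 := by
  intro F
  induction F with
  | zero =>
    intro arr count _
    have h0 : (arr.map (fun v => pvStepsB 0 v 0)).foldl max 0 = 0 := by
      apply foldl_max_eq_zero; intro x hx
      simp only [List.mem_map] at hx
      obtain ⟨v, _, hv⟩ := hx
      simpa [pvStepsB] using hv.symm
    simp [pvLoopA, h0]
  | succ F ih =>
    intro arr count hset
    have hpass := pvPassA_spec arr [] 0
    simp only [List.reverse_nil, List.nil_append, Nat.zero_add] at hpass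
    by_cases hall : ∀ v ∈ arr, pvChg v = false
    · -- no element changes: A breaks with count; every pvStepsB is 0
      have hnc : (pvPassA arr [] 0).2 = arr.length := by
        rw [hpass]; exact (pvPass_count_eq_length_iff arr).2 hall
      have hmax : (arr.map (fun v => pvStepsB (F + 1) v 0)).foldl max 0 = 0 := by
        apply foldl_max_eq_zero; intro x hx
        simp only [List.mem_map] at hx
        obtain ⟨v, hv, hxv⟩ := hx
        rw [← hxv]; exact pvStepsB_of_not_chg (hall v hv) _ _
      rw [pvLoopA_succ, if_pos hnc, hmax]
      ring
    · -- some element changes: A does one more pass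
      push_neg at hall
      obtain ⟨u, hu, huc'⟩ := hall
      have huc : pvChg u = true := by simpa using huc'
      have hnc : ¬ (pvPassA arr [] 0).2 = arr.length := by
        rw [hpass]
        intro hcontra
        exact huc' ((pvPass_count_eq_length_iff arr).1 hcontra u hu)
      have hsetstep : ∀ w ∈ arr.map pvStep, pvSettles F w := by
        intro w hw
        simp only [List.mem_map] at hw
        obtain ⟨v, hv, hvw⟩ := hw
        rw [← hvw]
        exact (pvSettles_succ_iff F v).1 (hset v hv)
      rw [pvLoopA_succ, if_neg hnc, hpass, ih (arr.map pvStep) (count + 1) hsetstep]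
      -- remains: count + maxA = (count + 1) + maxB where maxA = 1 + maxB
      rw [List.map_map]
      have hcomp : ((fun v => pvStepsB F v 0) ∘ pvStep) = fun v => pvStepsB F (pvStep v) 0 := rfl
      rw [hcomp]
      have hgnn : ∀ v : Int, (0 : Int) ≤ pvStepsB F (pvStep v) 0 :=
        fun v => pvStepsB_nonneg F _ 0 le_rfl
      have hf : ∀ v : Int, pvStepsB (F + 1) v 0 =
          if pvChg v then 1 + pvStepsB F (pvStep v) 0 else 0 := by
        intro v
        by_cases h : pvChg v = true
        · rw [pvStepsB_of_chg h, pvStepsB_shift, if_pos h]; ring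
        · rw [pvStepsB_of_not_chg (by simpa using h), if_neg (by simpa using h)]
      have hgz : ∀ v : Int, pvChg v = false → pvStepsB F (pvStep v) 0 = 0 := by
        intro v h
        rw [pvStep_of_not_chg h]
        exact pvStepsB_of_not_chg h F 0
      have hBnn : (0 : Int) ≤ (arr.map fun v => pvStepsB F (pvStep v) 0).foldl max 0 :=
        (PySem.List.le_foldl_max _ 0).1
      have key : (arr.map (fun v => pvStepsB (F + 1) v 0)).foldl max 0
          = 1 + (arr.map fun v => pvStepsB F (pvStep v) 0).foldl max 0 := by
        apply le_antisymm
        · apply foldl_max_le _ _ (by omega)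
          intro x hx
          simp only [List.mem_map] at hx
          obtain ⟨v, hv, hxv⟩ := hx
          rw [← hxv, hf v]
          by_cases h : pvChg v = true
          · rw [if_pos h]
            have hm : pvStepsB F (pvStep v) 0 ≤
                (arr.map fun v => pvStepsB F (pvStep v) 0).foldl max 0 :=
              (PySem.List.le_foldl_max _ 0).2 _ (List.mem_map.2 ⟨v, hv, rfl⟩)
            omega
          · rw [if_neg h]; omega
        · have hmemA : ∀ v ∈ arr, pvStepsB (F + 1) v 0 ≤
              (arr.map (fun v => pvStepsB (F + 1) v 0)).foldl max 0 := by
            intro v hv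
            exact (PySem.List.le_foldl_max _ 0).2 _ (List.mem_map.2 ⟨v, hv, rfl⟩)
          have hA1 : 1 + pvStepsB F (pvStep u) 0 ≤
              (arr.map (fun v => pvStepsB (F + 1) v 0)).foldl max 0 := by
            have h := hmemA u hu
            rwa [hf u, if_pos huc] at h
          have hBle : (arr.map fun v => pvStepsB F (pvStep v) 0).foldl max 0 ≤
              (arr.map (fun v => pvStepsB (F + 1) v 0)).foldl max 0 - 1 := by
            apply foldl_max_le _ _ (by have := hgnn u; omega)
            intro x hx
            simp only [List.mem_map] at hx
            obtain ⟨v, hv, hxv⟩ := hx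
            by_cases h : pvChg v = true
            · have hm := hmemA v hv
              rw [hf v, if_pos h] at hm
              omega
            · rw [← hxv, hgz v (by simpa using h)]
              have := hgnn u; omega
          omega
      rw [key]; ring

-- ---- fuel sufficiency: every admitted element settles within 100 steps ----
lemma pvMod_two (v : Int) : PySem.Int.mod v 2 = v % 2 :=
  PySem.Int.mod_eq_emod_of_pos (by norm_num)

-- a nonnegative odd value below 50 keeps doubling but escapes past 50 within 50 steps
lemma pvSettles_lt_50 : ∀ (k : Nat) (v : Int), 0 ≤ v → v < 50 → (50 - v).toNat ≤ k + 1 →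
    pvSettles (k + 1) v := by
  intro k
  induction k with
  | zero =>
    intro v h0 h50 hk
    have hv49 : v = 49 := by omega
    subst hv49
    have hs : pvStep 49 = 99 := by
      unfold pvStep
      simp only [pvMod_two]
      norm_num
    rw [pvSettles_succ_iff, hs]
    apply pvSettles_of_not_chg
    rw [pvChg_false_iff]
    simp only [pvMod_two]
    norm_num
  | succ k ih =>
    intro v h0 h50 hk
    by_cases hc : pvChg v = true
    · have hodd : PySem.Int.mod v 2 = 1 := by
        rw [pvChg_iff] at hc
        rcases hc with h | h
        · omega
        · exact h.2
      have hs : pvStep v = v * 2 + 1 := by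
        unfold pvStep
        rw [if_neg (by omega), if_pos ⟨h50, hodd⟩]
      rw [pvSettles_succ_iff, hs]
      by_cases hbig : v * 2 + 1 ≥ 50
      · -- escaped: an odd value ≥ 50 never changes again
        apply pvSettles_of_not_chg
        rw [pvChg_false_iff, pvMod_two] at *
        constructor
        · intro h; omega
        · intro h; omega
      · apply ih (v * 2 + 1) (by omega) (by omega) (by omega)
    · exact pvSettles_of_not_chg (by simpa using hc) _

-- values in [0, 100) settle within 52 steps
lemma pvSettles_lt_100 {v : Int} (h0 : 0 ≤ v) (h : v < 100) : pvSettles 52 v := by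
  by_cases h50 : v < 50
  · exact pvSettles_le (by omega) (pvSettles_lt_50 49 v h0 h50 (by omega))
  · by_cases hc : pvChg v = true
    · have heven : PySem.Int.mod v 2 = 0 := by
        rw [pvChg_iff] at hc
        rcases hc with hh | hh
        · exact hh.2
        · omega
      have hs : pvStep v = v / 2 := by
        unfold pvStep
        rw [if_pos ⟨by omega, heven⟩]
        exact PySem.Int.floordiv_eq_ediv_of_pos (by norm_num)
      have : pvSettles 51 (v / 2) :=
        pvSettles_le (by omega) (pvSettles_lt_50 49 (v / 2) (by omega) (by omega) (by omega))
      have h52 : pvSettles (51 + 1) v := by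
        rw [pvSettles_succ_iff, hs]
        exact this
      exact h52
    · exact pvSettles_of_not_chg (by simpa using hc) _

-- halving argument: values in [0, 100·2^k) settle within 52 + k steps
lemma pvSettles_pow : ∀ (k : Nat) (v : Int), 0 ≤ v → v < 100 * 2 ^ k → pvSettles (52 + k) v := by
  intro k
  induction k with
  | zero =>
    intro v h0 h
    exact pvSettles_lt_100 h0 (by simpa using h)
  | succ k ih =>
    intro v h0 h
    by_cases hlt : v < 100 * 2 ^ k
    · exact pvSettles_mono (ih v h0 hlt)
    · push_neg at hlt
      have h2k : (0 : Int) < 2 ^ k := pow_pos (by norm_num) k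
      have hv100 : 100 ≤ v := le_trans (by nlinarith) hlt
      by_cases hc : pvChg v = true
      · -- v ≥ 100 > 50, so if it changes it must be the halving branch
        have heven : PySem.Int.mod v 2 = 0 := by
          rw [pvChg_iff] at hc
          rcases hc with h1 | h2
          · exact h1.2
          · omega
        have hs : pvStep v = v / 2 := by
          unfold pvStep
          rw [if_pos ⟨by omega, heven⟩]
          exact PySem.Int.floordiv_eq_ediv_of_pos (by norm_num)
        have hlt' : v / 2 < 100 * 2 ^ k := by
          rw [pow_succ] at h; omega
        have hres := ih (v / 2) (by omega) hlt'
        show pvSettles (52 + k + 1) v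
        rw [pvSettles_succ_iff, hs]
        exact hres
      · exact pvSettles_of_not_chg (by simpa using hc) _

lemma pvSettles_100 {v : Int} (hdom : pvDomInt v = true)
    (hpre : ¬ (v < 0 ∧ PySem.Int.mod v 2 = 1)) : pvSettles 100 v := by
  by_cases h0 : 0 ≤ v
  · have hb : v ≤ 2147483648 := by
      unfold pvDomInt at hdom
      simp only [decide_eq_true_eq] at hdom
      exact hdom.2
    exact pvSettles_le (by norm_num) (pvSettles_pow 25 v h0 (by norm_num; omega))
  · -- negative: Pre_ forces it even, and a negative even number never changes
    push_neg at h0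
    have hchg : pvChg v = false := by
      rw [pvChg_false_iff]
      refine ⟨fun h => by omega, fun h => hpre ⟨h0, h.2⟩⟩
    exact pvSettles_of_not_chg hchg 100

-- ===== VERDICT (by name: the statement is the Claim_ definition above) =====
theorem solution_spec : Claim_equal_solution := by
  intro arr hdom hpre
  unfold Spec_solution solution solution_alt
  rw [pvLoop_eq_max 100 arr 0 (by
    intro v hv
    apply pvSettles_100
    · unfold Dom_solution at hdom
      exact (by simpa using hdom : ∀ x ∈ arr, pvDomInt x = true) v hv
    · exact hpre v hv)]
  ring
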